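-- pv_equiv track=rewrite | github.com/avdrob/learn | algorithms/uc_san_diego/toolbox/week5_dynamic_programming1/primitive_calculator.py | calculate
-- ===== SOURCE A (Python) =====
-- def calculate(n):
--     min_ops = [0] * (n + 1)
--     min_ops[1] = [1]
--
--     for i in range(2, n + 1):
--         seqs = [min_ops[i - 1]]
--         if i % 2 == 0:
--             seqs.append(min_ops[i // 2])
--         if i % 3 == 0:
--             seqs.append(min_ops[i // 3])
--
--         min_ops[i] = min(seqs, key=lambda seq: len(seq)).copy()
--         min_ops[i].append(i)
--
--     return min_ops[n]
-- ===== SOURCE B (Python) =====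
-- def calculate(n):
--     # O(n) DP: store only sequence lengths and a predecessor pointer,
--     # then reconstruct the single path backwards.  Same tie order as A
--     # (prefer i-1, then i//2, then i//3 on equal lengths).
--     count = [0] * (n + 1)
--     pred = [0] * (n + 1)
--     count[1] = 1
--     for i in range(2, n + 1):
--         best, p = count[i - 1], i - 1
--         if i % 2 == 0 and count[i // 2] < best:
--             best, p = count[i // 2], i // 2
--         if i % 3 == 0 and count[i // 3] < best:
--             best, p = count[i // 3], i // 3
--         count[i] = best + 1
--         pred[i] = p
--     path = []
--     i = n
--     while i > 1:
--         path.append(i)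
--         i = pred[i]
--     path.append(1)
--     path.reverse()
--     return path
-- ===== Notes on version B (the rewrite author's own statement) =====
-- stated objective: faster
-- what changed: Replaces A's table of full sequences (each copied when extended) by an O(n) DP over lengths with a predecessor pointer and a single backward path reconstruction, keeping A's tie order (i-1, then i//2, then i//3).
import Mathlib
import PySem

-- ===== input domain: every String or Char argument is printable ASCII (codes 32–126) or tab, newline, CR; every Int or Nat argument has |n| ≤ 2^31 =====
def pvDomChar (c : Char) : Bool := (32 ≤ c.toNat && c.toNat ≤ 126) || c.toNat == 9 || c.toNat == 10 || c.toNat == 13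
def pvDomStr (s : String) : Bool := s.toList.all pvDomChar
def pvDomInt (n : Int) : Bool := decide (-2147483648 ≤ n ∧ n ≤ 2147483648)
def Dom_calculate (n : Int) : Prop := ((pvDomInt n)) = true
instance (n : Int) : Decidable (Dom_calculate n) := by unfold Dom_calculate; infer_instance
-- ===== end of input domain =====

-- B replaces A's O(n^2) table of full copied sequences by an O(n) DP over
-- lengths with predecessor pointers plus one backward path reconstruction
-- (same tie order: i-1, then i//2, then i//3).

-- ===== PORT A =====
-- Python's min_ops[0] holds the int 0, which is never read as a sequence;
-- it is represented by [] here.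
def calcAstep (mo : List (List Int)) (i : Int) : List (List Int) :=
  let seqs := [PySem.List.pyGetD mo (i - 1) []]
  let seqs := if PySem.Int.mod i 2 = 0 then
      seqs ++ [PySem.List.pyGetD mo (PySem.Int.floordiv i 2) []] else seqs
  let seqs := if PySem.Int.mod i 3 = 0 then
      seqs ++ [PySem.List.pyGetD mo (PySem.Int.floordiv i 3) []] else seqs
  let best := (PySem.List.min? seqs (fun seq => seq.length)).getD []
  mo.set i.toNat (best ++ [i])

def calculate (n : Int) : List Int :=
  let min_ops : List (List Int) := List.replicate (n + 1).toNat []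
  let min_ops := min_ops.set 1 [1]
  let min_ops := (PySem.List.pyRange 2 (n + 1) 1).foldl calcAstep min_ops
  PySem.List.pyGetD min_ops n []

-- ===== PORT B =====
def calcBstep (cp : List Int × List Int) (i : Int) : List Int × List Int :=
  let count := cp.1
  let pred := cp.2
  let best := PySem.List.pyGetD count (i - 1) 0
  let p := i - 1
  let bp := if PySem.Int.mod i 2 = 0 ∧ PySem.List.pyGetD count (PySem.Int.floordiv i 2) 0 < best then
      (PySem.List.pyGetD count (PySem.Int.floordiv i 2) 0, PySem.Int.floordiv i 2) else (best, p)
  let bp := if PySem.Int.mod i 3 = 0 ∧ PySem.List.pyGetD count (PySem.Int.floordiv i 3) 0 < bp.1 then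
      (PySem.List.pyGetD count (PySem.Int.floordiv i 3) 0, PySem.Int.floordiv i 3) else bp
  (count.set i.toNat (bp.1 + 1), pred.set i.toNat bp.2)

-- the while loop; fuel n.toNat bounds the iterations (i strictly decreases)
def calcBpath (pred : List Int) : Nat → Int → List Int → List Int
  | 0, _, path => path
  | fuel + 1, i, path =>
      if 1 < i then calcBpath pred fuel (PySem.List.pyGetD pred i 0) (path ++ [i]) else path

def calculate_alt (n : Int) : List Int :=
  let m := (n + 1).toNat
  let count := (List.replicate m (0 : Int)).set 1 1
  let pred := List.replicate m (0 : Int)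
  let cp := (PySem.List.pyRange 2 (n + 1) 1).foldl calcBstep (count, pred)
  let path := calcBpath cp.2 n.toNat n []
  (path ++ [1]).reverse

-- ===== PRECONDITION & SPEC =====
-- Pre_ excludes n ≤ 0, where Python A raises IndexError (min_ops[1] = [1] on a
-- list of length ≤ 1); B raises there too.
def Pre_calculate (n : Int) : Prop := 1 ≤ n
instance (n : Int) : Decidable (Pre_calculate n) := by unfold Pre_calculate; infer_instance
def pvWitness_calculate : Int := (6)

def Spec_calculate (n : Int) (out : List Int) : Prop := out = calculate_alt n
instance (n : Int) (out : List Int) : Decidable (Spec_calculate n out) := by unfold Spec_calculate; infer_instance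

-- ===== CLAIM (what is proved, stated in full; the proofs are below) =====
def Claim_equal_calculate : Prop := ∀ (n : Int), Dom_calculate n → Pre_calculate n → Spec_calculate n (calculate n)

-- ===== LEMMAS AND PROOFS =====

-- length of the optimal sequence for i (mirrors B's selection order)
def pvLen (i : Nat) : Nat :=
  if h : i ≤ 1 then 1
  else
    let a := pvLen (i - 1)
    let b := if i % 2 = 0 ∧ pvLen (i / 2) < a then pvLen (i / 2) else a
    let c := if i % 3 = 0 ∧ pvLen (i / 3) < b then pvLen (i / 3) else b
    c + 1
termination_by i
decreasing_by all_goals omega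

-- predecessor chosen with A's tie order
def pvPred (i : Nat) : Nat :=
  let a := pvLen (i - 1)
  let bp := if i % 2 = 0 ∧ pvLen (i / 2) < a then (pvLen (i / 2), i / 2) else (a, i - 1)
  if i % 3 = 0 ∧ pvLen (i / 3) < bp.1 then i / 3 else bp.2

lemma pvPred_lt (i : Nat) (h : 2 ≤ i) : pvPred i < i := by
  unfold pvPred; (try dsimp only); split_ifs with h1 h2 h2 <;> omega

lemma pvPred_pos (i : Nat) (h : 2 ≤ i) : 1 ≤ pvPred i := by
  unfold pvPred; (try dsimp only); split_ifs with h1 h2 h2 <;> omega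

def pvSeq (i : Nat) : List Int :=
  if h : i ≤ 1 then [1]
  else pvSeq (pvPred i) ++ [(i : Int)]
termination_by i
decreasing_by exact pvPred_lt i (by omega)

lemma pvSeq_eq (i : Nat) (h : 2 ≤ i) : pvSeq i = pvSeq (pvPred i) ++ [(i : Int)] := by
  rw [pvSeq]; rw [dif_neg (by omega)]

lemma pvLen_succ (i : Nat) (h : 2 ≤ i) : pvLen i = pvLen (pvPred i) + 1 := by
  rw [pvLen, pvPred]; rw [dif_neg (by omega)]
  (try dsimp only); split_ifs <;> simp_all

lemma pvLen_eq_length (i : Nat) (h : 1 ≤ i) : pvLen i = (pvSeq i).length := by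
  induction i using Nat.strong_induction_on with
  | _ i ih =>
    by_cases h2 : 2 ≤ i
    · rw [pvSeq_eq i h2, pvLen_succ i h2, List.length_append]
      rw [ih (pvPred i) (pvPred_lt i h2) (pvPred_pos i h2)]
      simp
    · have : i = 1 := by omega
      subst this
      rw [pvLen, pvSeq]; simp

lemma pv_mod_cast (i b : Nat) : PySem.Int.mod (i : Int) (b : Nat) = ((i % b : Nat) : Int) := by
  simp [PySem.Int.mod, Int.fmod_eq_emod]

lemma pv_div_cast (i b : Nat) : PySem.Int.floordiv (i : Int) (b : Nat) = ((i / b : Nat) : Int) := by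
  simp [PySem.Int.floordiv, Int.fdiv_eq_ediv]

-- the A-side state after processing 2..k
def moSpec (N k : Nat) : List (List Int) :=
  (List.range (N + 1)).map (fun j => if 1 ≤ j ∧ j ≤ k then pvSeq j else [])

lemma moSpec_get (N k j : Nat) (hN : j ≤ N) :
    PySem.List.pyGetD (moSpec N k) (j : Int) [] =
      if 1 ≤ j ∧ j ≤ k then pvSeq j else [] := by
  rw [PySem.List.pyGetD_of_nonneg _ _ (by positivity)]
  simp only [Int.toNat_natCast, moSpec]
  exact PySem.List.getD_map_range _ _ _ _ (by omega)

-- the B-side state after processing 2..k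
def cntSpec (N k : Nat) : List Int :=
  (List.range (N + 1)).map (fun j => if 1 ≤ j ∧ j ≤ k then (pvLen j : Int) else 0)
def prdSpec (N k : Nat) : List Int :=
  (List.range (N + 1)).map (fun j => if 2 ≤ j ∧ j ≤ k then (pvPred j : Int) else 0)

lemma cntSpec_get (N k j : Nat) (hN : j ≤ N) :
    PySem.List.pyGetD (cntSpec N k) (j : Int) 0 =
      if 1 ≤ j ∧ j ≤ k then (pvLen j : Int) else 0 := by
  rw [PySem.List.pyGetD_of_nonneg _ _ (by positivity)]
  simp only [Int.toNat_natCast, cntSpec]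
  exact PySem.List.getD_map_range _ _ _ _ (by omega)

lemma prdSpec_get (N k j : Nat) (hN : j ≤ N) :
    PySem.List.pyGetD (prdSpec N k) (j : Int) 0 =
      if 2 ≤ j ∧ j ≤ k then (pvPred j : Int) else 0 := by
  rw [PySem.List.pyGetD_of_nonneg _ _ (by positivity)]
  simp only [Int.toNat_natCast, prdSpec]
  exact PySem.List.getD_map_range _ _ _ _ (by omega)

lemma moSpec_set (N k : Nat) (h1 : 1 ≤ k) (hk : k ≤ N) :
    (moSpec N (k - 1)).set k (pvSeq k) = moSpec N k := by
  unfold moSpec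
  apply List.ext_getElem
  · simp
  · intro j hj hj'
    simp only [List.getElem_set, List.getElem_map, List.getElem_range]
    simp only [List.length_set, List.length_map, List.length_range] at hj
    by_cases hjk : j = k
    · subst hjk; simp [h1]
    · have hiff : (1 ≤ j ∧ j ≤ k - 1) ↔ (1 ≤ j ∧ j ≤ k) := by omega
      simp [show ¬(k = j) from fun h => hjk h.symm, hiff]

lemma pvPred_eq_33 (i : Nat) (p2 : i % 2 = 0) (p3 : i % 3 = 0) :
    pvPred i = (if pvLen (i / 3) < (if pvLen (i / 2) < pvLen (i - 1) then pvLen (i / 2) else pvLen (i - 1))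
      then i / 3 else if pvLen (i / 2) < pvLen (i - 1) then i / 2 else i - 1) := by
  unfold pvPred; simp [p2, p3]; split_ifs <;> simp_all

lemma pvPred_eq_2 (i : Nat) (p2 : i % 2 = 0) (p3 : ¬ i % 3 = 0) :
    pvPred i = (if pvLen (i / 2) < pvLen (i - 1) then i / 2 else i - 1) := by
  unfold pvPred; simp [p2, p3]; split_ifs <;> simp_all

lemma pvPred_eq_3 (i : Nat) (p2 : ¬ i % 2 = 0) (p3 : i % 3 = 0) :
    pvPred i = (if pvLen (i / 3) < pvLen (i - 1) then i / 3 else i - 1) := by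
  unfold pvPred; simp [p2, p3]

lemma pvPred_eq_0 (i : Nat) (p2 : ¬ i % 2 = 0) (p3 : ¬ i % 3 = 0) :
    pvPred i = i - 1 := by
  unfold pvPred; simp [p2, p3]

lemma A_step (N i : Nat) (h2 : 2 ≤ i) (hN : i ≤ N) :
    calcAstep (moSpec N (i - 1)) (i : Int) = moSpec N i := by
  have e1 : (i : Int) - 1 = ((i - 1 : Nat) : Int) := by omega
  have g1 : PySem.List.pyGetD (moSpec N (i - 1)) ((i - 1 : Nat) : Int) [] = pvSeq (i - 1) := by
    rw [moSpec_get N (i - 1) (i - 1) (by omega)]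
    simp [show (1:Nat) ≤ i - 1 from by omega]
  have m2 : PySem.Int.mod (i : Int) 2 = ((i % 2 : Nat) : Int) := by
    simpa using pv_mod_cast i 2
  have m3 : PySem.Int.mod (i : Int) 3 = ((i % 3 : Nat) : Int) := by
    simpa using pv_mod_cast i 3
  have d2 : PySem.Int.floordiv (i : Int) 2 = ((i / 2 : Nat) : Int) := by
    simpa using pv_div_cast i 2
  have d3 : PySem.Int.floordiv (i : Int) 3 = ((i / 3 : Nat) : Int) := by
    simpa using pv_div_cast i 3
  have c2 : PySem.List.pyGetD (moSpec N (i - 1)) ((i / 2 : Nat) : Int) [] = pvSeq (i / 2) := by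
    rw [moSpec_get N (i - 1) (i / 2) (by omega)]
    simp [show 1 ≤ i / 2 ∧ i / 2 ≤ i - 1 from by omega]
  have hti : ((i : Int)).toNat = i := by omega
  unfold calcAstep
  simp only [e1, g1, m2, m3, d2, d3, c2, Int.natCast_eq_zero, hti]
  have l1 : (pvSeq (i - 1)).length = pvLen (i - 1) := (pvLen_eq_length _ (by omega)).symm
  have l2 : (pvSeq (i / 2)).length = pvLen (i / 2) := (pvLen_eq_length _ (by omega)).symm
  have hset : ∀ p : Nat, p = pvPred i →
      (moSpec N (i - 1)).set i (pvSeq p ++ [(i : Int)]) = moSpec N i := by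
    intro p hp
    rw [hp, ← pvSeq_eq i h2]
    exact moSpec_set N i (by omega) hN
  by_cases p2 : i % 2 = 0 <;> by_cases p3 : i % 3 = 0
  case pos =>
    have c3 : PySem.List.pyGetD (moSpec N (i - 1)) ((i / 3 : Nat) : Int) [] = pvSeq (i / 3) := by
      rw [moSpec_get N (i - 1) (i / 3) (by omega)]
      simp [show 1 ≤ i / 3 ∧ i / 3 ≤ i - 1 from by omega]
    have l3 : (pvSeq (i / 3)).length = pvLen (i / 3) := (pvLen_eq_length _ (by omega)).symm
    rw [if_pos p2, if_pos p3, c3]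
    simp only [PySem.List.min?, List.foldl, List.cons_append, List.nil_append]
    by_cases q2 : (pvSeq (i / 2)).length < (pvSeq (i - 1)).length
    · rw [if_pos q2]; (try dsimp only)
      rw [l2] at q2
      by_cases q3 : (pvSeq (i / 3)).length < (pvSeq (i / 2)).length
      · rw [if_pos q3]; rw [l2, l3] at q3
        exact hset _ (by rw [pvPred_eq_33 i p2 p3]; split_ifs <;> omega)
      · rw [if_neg q3]; rw [l2, l3] at q3
        exact hset _ (by rw [pvPred_eq_33 i p2 p3]; split_ifs <;> omega)
    · rw [if_neg q2]; (try dsimp only)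
      rw [l1, l2] at q2
      by_cases q3 : (pvSeq (i / 3)).length < (pvSeq (i - 1)).length
      · rw [if_pos q3]; rw [l1, l3] at q3
        exact hset _ (by rw [pvPred_eq_33 i p2 p3]; split_ifs <;> omega)
      · rw [if_neg q3]; rw [l1, l3] at q3
        exact hset _ (by rw [pvPred_eq_33 i p2 p3]; split_ifs <;> omega)
  case neg =>
    rw [if_pos p2, if_neg p3]
    simp only [PySem.List.min?, List.foldl, List.cons_append, List.nil_append]
    by_cases q2 : (pvSeq (i / 2)).length < (pvSeq (i - 1)).length
    · rw [if_pos q2]; rw [l1, l2] at q2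
      exact hset _ (by rw [pvPred_eq_2 i p2 p3]; split_ifs <;> omega)
    · rw [if_neg q2]; rw [l1, l2] at q2
      exact hset _ (by rw [pvPred_eq_2 i p2 p3]; split_ifs <;> omega)
  case pos =>
    have hi3 : 3 ≤ i := by omega
    have c3 : PySem.List.pyGetD (moSpec N (i - 1)) ((i / 3 : Nat) : Int) [] = pvSeq (i / 3) := by
      rw [moSpec_get N (i - 1) (i / 3) (by omega)]
      simp [show 1 ≤ i / 3 ∧ i / 3 ≤ i - 1 from by omega]
    have l3 : (pvSeq (i / 3)).length = pvLen (i / 3) := (pvLen_eq_length _ (by omega)).symm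
    rw [if_neg p2, if_pos p3, c3]
    simp only [PySem.List.min?, List.foldl, List.cons_append, List.nil_append]
    by_cases q3 : (pvSeq (i / 3)).length < (pvSeq (i - 1)).length
    · rw [if_pos q3]; rw [l1, l3] at q3
      exact hset _ (by rw [pvPred_eq_3 i p2 p3]; split_ifs <;> omega)
    · rw [if_neg q3]; rw [l1, l3] at q3
      exact hset _ (by rw [pvPred_eq_3 i p2 p3]; split_ifs <;> omega)
  case neg =>
    rw [if_neg p2, if_neg p3]
    simp only [PySem.List.min?, List.foldl, List.cons_append, List.nil_append]
    exact hset _ (pvPred_eq_0 i p2 p3).symm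

lemma A_fold (N : Nat) : ∀ k : Nat, 1 ≤ k → k ≤ N →
    (PySem.List.pyRange 2 ((k : Int) + 1) 1).foldl calcAstep (moSpec N 1) = moSpec N k := by
  intro k
  induction k with
  | zero => omega
  | succ k ih =>
    intro _ hk
    by_cases hk1 : k = 0
    · subst hk1
      rw [show ((0 + 1 : Nat) : Int) + 1 = 2 from by norm_num,
        PySem.List.pyRange_one_eq_nil (by norm_num)]
      rfl
    · have hc : ((k + 1 : Nat) : Int) + 1 = ((k : Int) + 1) + 1 := by push_cast; ring
      rw [hc, PySem.List.pyRange_one_succ_right (by omega : (2 : Int) ≤ (k : Int) + 1),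
        List.foldl_append, ih (by omega) (by omega)]
      have := A_step N (k + 1) (by omega) hk
      simp only [List.foldl]
      simpa [Nat.add_sub_cancel] using this

lemma cntSpec_set (N k : Nat) (h1 : 1 ≤ k) (hk : k ≤ N) :
    (cntSpec N (k - 1)).set k ((pvLen k : Nat) : Int) = cntSpec N k := by
  unfold cntSpec
  apply List.ext_getElem
  · simp
  · intro j hj hj'
    simp only [List.getElem_set, List.getElem_map, List.getElem_range]
    simp only [List.length_set, List.length_map, List.length_range] at hj
    by_cases hjk : j = k
    · subst hjk; simp [h1]
    · have hiff : (1 ≤ j ∧ j ≤ k - 1) ↔ (1 ≤ j ∧ j ≤ k) := by omega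
      simp [show ¬(k = j) from fun h => hjk h.symm, hiff]

lemma prdSpec_set (N k : Nat) (h1 : 2 ≤ k) (hk : k ≤ N) :
    (prdSpec N (k - 1)).set k ((pvPred k : Nat) : Int) = prdSpec N k := by
  unfold prdSpec
  apply List.ext_getElem
  · simp
  · intro j hj hj'
    simp only [List.getElem_set, List.getElem_map, List.getElem_range]
    simp only [List.length_set, List.length_map, List.length_range] at hj
    by_cases hjk : j = k
    · subst hjk; simp [h1]
    · have hiff : (2 ≤ j ∧ j ≤ k - 1) ↔ (2 ≤ j ∧ j ≤ k) := by omega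
      simp [show ¬(k = j) from fun h => hjk h.symm, hiff]

lemma pvLen_eq_33 (i : Nat) (h2 : 2 ≤ i) (p2 : i % 2 = 0) (p3 : i % 3 = 0) :
    pvLen i = (if pvLen (i / 3) < (if pvLen (i / 2) < pvLen (i - 1) then pvLen (i / 2) else pvLen (i - 1))
      then pvLen (i / 3) else if pvLen (i / 2) < pvLen (i - 1) then pvLen (i / 2) else pvLen (i - 1)) + 1 := by
  rw [pvLen, dif_neg (by omega)]; simp [p2, p3]

lemma pvLen_eq_2 (i : Nat) (h2 : 2 ≤ i) (p2 : i % 2 = 0) (p3 : ¬ i % 3 = 0) :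
    pvLen i = (if pvLen (i / 2) < pvLen (i - 1) then pvLen (i / 2) else pvLen (i - 1)) + 1 := by
  rw [pvLen, dif_neg (by omega)]; simp [p2, p3]

lemma pvLen_eq_3 (i : Nat) (h2 : 2 ≤ i) (p2 : ¬ i % 2 = 0) (p3 : i % 3 = 0) :
    pvLen i = (if pvLen (i / 3) < pvLen (i - 1) then pvLen (i / 3) else pvLen (i - 1)) + 1 := by
  rw [pvLen, dif_neg (by omega)]; simp [p2, p3]

lemma pvLen_eq_0 (i : Nat) (h2 : 2 ≤ i) (p2 : ¬ i % 2 = 0) (p3 : ¬ i % 3 = 0) :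
    pvLen i = pvLen (i - 1) + 1 := by
  rw [pvLen, dif_neg (by omega)]; simp [p2, p3]

lemma B_step (N i : Nat) (h2 : 2 ≤ i) (hN : i ≤ N) :
    calcBstep (cntSpec N (i - 1), prdSpec N (i - 1)) (i : Int) = (cntSpec N i, prdSpec N i) := by
  have e1 : (i : Int) - 1 = ((i - 1 : Nat) : Int) := by omega
  have g1 : PySem.List.pyGetD (cntSpec N (i - 1)) ((i - 1 : Nat) : Int) 0 = ((pvLen (i - 1) : Nat) : Int) := by
    rw [cntSpec_get N (i - 1) (i - 1) (by omega)]
    simp [show (1:Nat) ≤ i - 1 from by omega]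
  have m2 : PySem.Int.mod (i : Int) 2 = ((i % 2 : Nat) : Int) := by
    simpa using pv_mod_cast i 2
  have m3 : PySem.Int.mod (i : Int) 3 = ((i % 3 : Nat) : Int) := by
    simpa using pv_mod_cast i 3
  have d2 : PySem.Int.floordiv (i : Int) 2 = ((i / 2 : Nat) : Int) := by
    simpa using pv_div_cast i 2
  have d3 : PySem.Int.floordiv (i : Int) 3 = ((i / 3 : Nat) : Int) := by
    simpa using pv_div_cast i 3
  have c2 : PySem.List.pyGetD (cntSpec N (i - 1)) ((i / 2 : Nat) : Int) 0 = ((pvLen (i / 2) : Nat) : Int) := by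
    rw [cntSpec_get N (i - 1) (i / 2) (by omega)]
    simp [show 1 ≤ i / 2 ∧ i / 2 ≤ i - 1 from by omega]
  have hti : ((i : Int)).toNat = i := by omega
  have hfin : ∀ (c : Nat) (p : Nat), c + 1 = pvLen i → p = pvPred i →
      ((cntSpec N (i - 1)).set i ((c : Int) + 1), (prdSpec N (i - 1)).set i ((p : Nat) : Int)) =
        (cntSpec N i, prdSpec N i) := by
    intro c p hc hp
    rw [show ((c : Int) + 1) = ((pvLen i : Nat) : Int) from by omega, hp,
      cntSpec_set N i (by omega) hN, prdSpec_set N i h2 hN]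
  unfold calcBstep
  simp only [e1, g1, m2, m3, d2, d3, c2, Int.natCast_eq_zero, hti]
  by_cases p2 : i % 2 = 0 <;> by_cases p3 : i % 3 = 0
  · have c3 : PySem.List.pyGetD (cntSpec N (i - 1)) ((i / 3 : Nat) : Int) 0 = ((pvLen (i / 3) : Nat) : Int) := by
      rw [cntSpec_get N (i - 1) (i / 3) (by omega)]
      simp [show 1 ≤ i / 3 ∧ i / 3 ≤ i - 1 from by omega]
    rw [c3]
    simp only [p2, p3, true_and, Nat.cast_lt]
    split_ifs with hq1 hq2 hq2 <;>
      exact hfin _ _ (by rw [pvLen_eq_33 i h2 p2 p3] <;> split_ifs <;> omega)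
        (by rw [pvPred_eq_33 i p2 p3] <;> split_ifs <;> omega)
  · simp only [p2, p3, true_and, false_and, if_false, Nat.cast_lt]
    split_ifs with h1 <;>
      exact hfin _ _ (by rw [pvLen_eq_2 i h2 p2 p3] <;> split_ifs <;> omega)
        (by rw [pvPred_eq_2 i p2 p3] <;> split_ifs <;> omega)
  · have c3 : PySem.List.pyGetD (cntSpec N (i - 1)) ((i / 3 : Nat) : Int) 0 = ((pvLen (i / 3) : Nat) : Int) := by
      rw [cntSpec_get N (i - 1) (i / 3) (by omega)]
      simp [show 1 ≤ i / 3 ∧ i / 3 ≤ i - 1 from by omega]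
    rw [c3]
    simp only [p2, p3, true_and, false_and, if_false, Nat.cast_lt]
    split_ifs with h1 <;>
      exact hfin _ _ (by rw [pvLen_eq_3 i h2 p2 p3] <;> split_ifs <;> omega)
        (by rw [pvPred_eq_3 i p2 p3] <;> split_ifs <;> omega)
  · simp only [p2, p3, false_and, if_false]
    exact hfin _ _ (pvLen_eq_0 i h2 p2 p3).symm (pvPred_eq_0 i p2 p3).symm

lemma B_fold (N : Nat) : ∀ k : Nat, 1 ≤ k → k ≤ N →
    (PySem.List.pyRange 2 ((k : Int) + 1) 1).foldl calcBstep (cntSpec N 1, prdSpec N 1) =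
      (cntSpec N k, prdSpec N k) := by
  intro k
  induction k with
  | zero => omega
  | succ k ih =>
    intro _ hk
    by_cases hk1 : k = 0
    · subst hk1
      rw [show ((0 + 1 : Nat) : Int) + 1 = 2 from by norm_num,
        PySem.List.pyRange_one_eq_nil (by norm_num)]
      rfl
    · have hc : ((k + 1 : Nat) : Int) + 1 = ((k : Int) + 1) + 1 := by push_cast; ring
      rw [hc, PySem.List.pyRange_one_succ_right (by omega : (2 : Int) ≤ (k : Int) + 1),
        List.foldl_append, ih (by omega) (by omega)]
      have := B_step N (k + 1) (by omega) hk
      simp only [List.foldl]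
      simpa [Nat.add_sub_cancel] using this

lemma B_path (N : Nat) : ∀ (fuel i : Nat) (path : List Int), 1 ≤ i → i ≤ N → i ≤ fuel →
    calcBpath (prdSpec N N) fuel (i : Int) path ++ [1] = path ++ (pvSeq i).reverse := by
  intro fuel
  induction fuel with
  | zero => intro i path h1 _ hf; omega
  | succ fuel ih =>
    intro i path h1 hN hf
    by_cases h2 : 2 ≤ i
    · rw [calcBpath, if_pos (by exact_mod_cast (by omega : (1 : Int) < (i : Int)))]
      have gp : PySem.List.pyGetD (prdSpec N N) (i : Int) 0 = ((pvPred i : Nat) : Int) := by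
        rw [prdSpec_get N N i hN]
        simp [show 2 ≤ i ∧ i ≤ N from ⟨h2, hN⟩]
      rw [gp, ih (pvPred i) (path ++ [(i : Int)]) (pvPred_pos i h2)
        (by have := pvPred_lt i h2; omega) (by have := pvPred_lt i h2; omega)]
      rw [pvSeq_eq i h2]
      simp
    · have hi1 : i = 1 := by omega
      subst hi1
      rw [calcBpath, if_neg (by norm_num)]
      rw [pvSeq]
      simp

lemma moSpec_init (N : Nat) (h : 1 ≤ N) :
    (List.replicate (N + 1) ([] : List Int)).set 1 [1] = moSpec N 1 := by
  unfold moSpec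
  apply List.ext_getElem
  · simp
  · intro j hj hj'
    simp only [List.getElem_set, List.getElem_replicate, List.getElem_map, List.getElem_range]
    simp only [List.length_set, List.length_replicate] at hj
    by_cases hj1 : j = 1
    · subst hj1; simp [pvSeq]
    · rw [if_neg (show ¬(1 = j) from fun h => hj1 h.symm),
        if_neg (show ¬(1 ≤ j ∧ j ≤ 1) from fun h => hj1 (by omega))]

lemma cntSpec_init (N : Nat) (h : 1 ≤ N) :
    (List.replicate (N + 1) (0 : Int)).set 1 1 = cntSpec N 1 := by
  unfold cntSpec
  apply List.ext_getElem
  · simp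
  · intro j hj hj'
    simp only [List.getElem_set, List.getElem_replicate, List.getElem_map, List.getElem_range]
    simp only [List.length_set, List.length_replicate] at hj
    by_cases hj1 : j = 1
    · subst hj1; simp [pvLen]
    · rw [if_neg (show ¬(1 = j) from fun h => hj1 h.symm),
        if_neg (show ¬(1 ≤ j ∧ j ≤ 1) from fun h => hj1 (by omega))]

lemma prdSpec_init (N : Nat) :
    List.replicate (N + 1) (0 : Int) = prdSpec N 1 := by
  unfold prdSpec
  apply List.ext_getElem
  · simp
  · intro j hj hj'
    simp only [List.getElem_replicate, List.getElem_map, List.getElem_range]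
    rw [if_neg (show ¬(2 ≤ j ∧ j ≤ 1) from fun h => by omega)]

lemma calc_A (n : Int) (h : 1 ≤ n) : calculate n = pvSeq n.toNat := by
  have hN : 1 ≤ n.toNat := by omega
  have hn1 : (n + 1).toNat = n.toNat + 1 := by omega
  have hcast : ((n.toNat : Int)) = n := by omega
  unfold calculate
  dsimp only
  rw [hn1, moSpec_init n.toNat hN]
  rw [show n + 1 = ((n.toNat : Int)) + 1 from by omega]
  rw [A_fold n.toNat n.toNat hN (le_refl _)]
  rw [show n = ((n.toNat : Nat) : Int) from hcast.symm]
  simp only [Int.toNat_natCast]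
  rw [moSpec_get n.toNat n.toNat n.toNat (le_refl _)]
  simp [hN]

lemma calc_B (n : Int) (h : 1 ≤ n) : calculate_alt n = pvSeq n.toNat := by
  have hN : 1 ≤ n.toNat := by omega
  have hn1 : (n + 1).toNat = n.toNat + 1 := by omega
  unfold calculate_alt
  dsimp only
  rw [hn1, cntSpec_init n.toNat hN, prdSpec_init n.toNat]
  rw [show n + 1 = ((n.toNat : Int)) + 1 from by omega]
  rw [B_fold n.toNat n.toNat hN (le_refl _)]
  have := B_path n.toNat n.toNat n.toNat [] hN (le_refl _) (le_refl _)
  rw [show n = ((n.toNat : Nat) : Int) from by omega]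
  simp only [Int.toNat_natCast]
  rw [this]
  simp

-- ===== VERDICT (by name: the statement is the Claim_ definition above) =====
theorem calculate_spec : Claim_equal_calculate := by
  intro n _ hpre
  unfold Spec_calculate
  rw [calc_A n hpre, calc_B n hpre]
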